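-- pv_equiv track=rewrite | github.com/finlaymcnally/RecipeImporter | cookimport/runs/stage_observability.py | _count_metadata_value_rows
-- ===== SOURCE A (Python) =====
-- from collections import Counter
-- from typing import Any, Mapping
--
-- def _count_metadata_value_rows(
--     rows: list[dict[str, Any]],
--     metadata_key: str,
-- ) -> dict[str, int]:
--     counts: Counter[str] = Counter()
--     for row in rows:
--         metadata = row.get("metadata")
--         if not isinstance(metadata, Mapping):
--             continue
--         value = str(metadata.get(metadata_key) or "").strip()
--         if value:
--             counts[value] += 1
--     return dict(sorted(counts.items()))
-- ===== SOURCE B (Python) =====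
-- from typing import Any, Mapping
--
--
-- def _count_metadata_value_rows(
--     rows: list[dict[str, Any]],
--     metadata_key: str,
-- ) -> dict[str, int]:
--     # Collect the surviving values in one pass, then sort and count runs
--     # of equal values (sort-and-group instead of a running Counter).
--     values: list[str] = []
--     for row in rows:
--         metadata = row.get("metadata")
--         if not isinstance(metadata, Mapping):
--             continue
--         value = str(metadata.get(metadata_key) or "").strip()
--         if value:
--             values.append(value)
--     values.sort()
--     result: dict[str, int] = {}
--     i = 0
--     n = len(values)
--     while i < n:
--         j = i
--         while j < n and values[j] == values[i]:
--             j += 1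
--         result[values[i]] = j - i
--         i = j
--     return result
-- ===== Notes on version B (the rewrite author's own statement) =====
-- stated objective: alternative
-- what changed: B replaces the per-key running Counter by a sort-and-group pass: it collects the surviving values in a list, sorts it, and counts consecutive runs of equal values to build the result dict.
import Mathlib
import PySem

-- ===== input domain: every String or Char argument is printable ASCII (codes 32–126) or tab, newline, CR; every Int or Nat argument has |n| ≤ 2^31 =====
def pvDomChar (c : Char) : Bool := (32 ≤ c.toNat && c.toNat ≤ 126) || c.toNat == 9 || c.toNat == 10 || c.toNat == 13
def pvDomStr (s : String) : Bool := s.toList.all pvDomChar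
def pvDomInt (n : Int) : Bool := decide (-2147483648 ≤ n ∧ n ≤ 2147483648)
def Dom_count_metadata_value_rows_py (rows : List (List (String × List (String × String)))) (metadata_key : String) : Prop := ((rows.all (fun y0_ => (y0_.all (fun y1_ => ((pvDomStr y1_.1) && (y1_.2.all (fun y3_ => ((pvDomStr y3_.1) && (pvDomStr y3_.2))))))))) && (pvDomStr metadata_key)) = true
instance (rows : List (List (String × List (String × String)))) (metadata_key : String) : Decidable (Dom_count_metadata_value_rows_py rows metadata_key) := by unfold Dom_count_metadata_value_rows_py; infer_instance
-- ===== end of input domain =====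

-- B counts by sort-then-group-runs instead of A's running Counter; same result, alternative algorithm.

-- dict.get(k): first match in the association list (shared dict primitive of both ports)
def pvGet {α : Type} (d : List (String × α)) (k : String) : Option α :=
  (d.find? (fun p => p.1 == k)).map (·.2)

-- ===== PORT A =====
-- In the typed domain every value stored under "metadata" is a dict, so the
-- isinstance(metadata, Mapping) test is exactly "the key is present";
-- `metadata.get(metadata_key) or ""` equals getD "" (None and "" both give "");
-- Counter increment = d[value] = d.get(value, 0) + 1; sorted(counts.items())
-- compares pairs with DISTINCT first components, i.e. sorts by the key.
def count_metadata_value_rows_py (rows : List (List (String × List (String × String)))) (metadata_key : String) : List (String × Int) :=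
  let counts : PySem.Dict String Int :=
    rows.foldl (fun counts row =>
      match pvGet row "metadata" with
      | none => counts
      | some metadata =>
        let value := PySem.Str.strip ((pvGet metadata metadata_key).getD "")
        if value ≠ "" then counts.insert value (counts.getD value 0 + 1) else counts)
      PySem.Dict.empty
  PySem.List.sorted counts.items (fun p => p.1) false

-- ===== PORT B =====
-- the grouping while-loop of Source B: consume the run of values equal to the head,
-- emit (head, run length), continue after the run
def pvGroupCount : List String → List (String × Int)
  | [] => []
  | x :: xs =>
    (x, 1 + ((xs.takeWhile (· == x)).length : Int)) :: pvGroupCount (xs.dropWhile (· == x))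
  termination_by l => l.length
  decreasing_by
    simp only [List.length_cons]
    exact Nat.lt_succ_of_le (List.length_dropWhile_le _ _)

def count_metadata_value_rows_py_alt (rows : List (List (String × List (String × String)))) (metadata_key : String) : List (String × Int) :=
  let values : List String :=
    rows.foldl (fun values row =>
      match pvGet row "metadata" with
      | none => values
      | some metadata =>
        let value := PySem.Str.strip ((pvGet metadata metadata_key).getD "")
        if value ≠ "" then values ++ [value] else values)
      []
  pvGroupCount (PySem.List.sorted values (fun x => x) false)

-- ===== PRECONDITION & SPEC =====
def Spec_count_metadata_value_rows_py (rows : List (List (String × List (String × String)))) (metadata_key : String) (out : List (String × Int)) : Prop := out = count_metadata_value_rows_py_alt rows metadata_key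
instance (rows : List (List (String × List (String × String)))) (metadata_key : String) (out : List (String × Int)) : Decidable (Spec_count_metadata_value_rows_py rows metadata_key out) := by unfold Spec_count_metadata_value_rows_py; infer_instance

-- ===== CLAIM (what is proved, stated in full; the proofs are below) =====
def Claim_equal_count_metadata_value_rows_py : Prop := ∀ (rows : List (List (String × List (String × String)))) (metadata_key : String), Dom_count_metadata_value_rows_py rows metadata_key → Spec_count_metadata_value_rows_py rows metadata_key (count_metadata_value_rows_py rows metadata_key)

-- ===== LEMMAS AND PROOFS =====

-- the common filter of both loops, as a partial extraction function
def pvExtract (metadata_key : String) (row : List (String × List (String × String))) : Option String :=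
  match pvGet row "metadata" with
  | none => none
  | some metadata =>
    let value := PySem.Str.strip ((pvGet metadata metadata_key).getD "")
    if value ≠ "" then some value else none

theorem pvA_fold (metadata_key : String) :
    ∀ (rows : List (List (String × List (String × String)))) (d : PySem.Dict String Int),
      rows.foldl (fun counts row =>
        match pvGet row "metadata" with
        | none => counts
        | some metadata =>
          let value := PySem.Str.strip ((pvGet metadata metadata_key).getD "")
          if value ≠ "" then counts.insert value (counts.getD value 0 + 1) else counts) d
      = (rows.filterMap (pvExtract metadata_key)).foldl
          (fun d x => d.insert x (d.getD x 0 + 1)) d := by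
  intro rows
  induction rows with
  | nil => intro d; rfl
  | cons r rs ih =>
    intro d
    simp only [List.foldl_cons, List.filterMap_cons, pvExtract]
    cases pvGet r "metadata" with
    | none => exact ih d
    | some md =>
      dsimp only
      split_ifs with h
      · simp only [List.foldl_cons]; exact ih _
      · exact ih d

theorem pvB_fold (metadata_key : String) :
    ∀ (rows : List (List (String × List (String × String)))) (acc : List String),
      rows.foldl (fun values row =>
        match pvGet row "metadata" with
        | none => values
        | some metadata =>
          let value := PySem.Str.strip ((pvGet metadata metadata_key).getD "")
          if value ≠ "" then values ++ [value] else values) acc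
      = acc ++ rows.filterMap (pvExtract metadata_key) := by
  intro rows
  induction rows with
  | nil => intro acc; simp
  | cons r rs ih =>
    intro acc
    simp only [List.foldl_cons, List.filterMap_cons, pvExtract]
    cases pvGet r "metadata" with
    | none => exact ih acc
    | some md =>
      dsimp only
      split_ifs with h
      · rw [ih]; simp only [List.append_assoc, List.singleton_append]; rfl
      · exact ih acc

-- Set.add on a fresh head of the accumulator keeps the head in place
theorem pvAdd_cons_of_ne (s : List String) (x y : String) (h : y ≠ x) :
    PySem.Set.add (x :: s) y = x :: PySem.Set.add s y := by
  have hb : (y == x) = false := beq_eq_false_iff_ne.mpr h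
  simp only [PySem.Set.add, PySem.Set.contains, List.contains_cons, hb, Bool.false_or]
  split_ifs <;> simp

theorem pvFoldlAdd_fresh (l : List String) : ∀ (s : List String) (x : String), x ∉ l →
    l.foldl PySem.Set.add (x :: s) = x :: l.foldl PySem.Set.add s := by
  induction l with
  | nil => intro s x _; rfl
  | cons y l ih =>
    intro s x hx
    have hyx : y ≠ x := by rintro rfl; exact hx (List.mem_cons_self ..)
    rw [List.foldl_cons, List.foldl_cons, pvAdd_cons_of_ne _ _ _ hyx,
      ih _ x (fun h' => hx (List.mem_cons_of_mem _ h'))]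

theorem pvFoldlAdd_const (l : List String) : ∀ (s : List String), (∀ y ∈ l, y ∈ s) →
    l.foldl PySem.Set.add s = s := by
  induction l with
  | nil => intro s _; rfl
  | cons y l ih =>
    intro s h
    have hadd : PySem.Set.add s y = s := by
      simp only [PySem.Set.add, PySem.Set.contains]
      simp [h y (List.mem_cons_self ..)]
    rw [List.foldl_cons, hadd]
    exact ih s (fun z hz => h z (List.mem_cons_of_mem _ hz))

-- the fold of Set.add appends a sublist of its input after the seed
theorem pvFoldlAdd_sublist (l : List String) : ∀ (s : List String),
    ∃ t, t.Sublist l ∧ l.foldl PySem.Set.add s = s ++ t := by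
  induction l with
  | nil => intro s; exact ⟨[], by simp, by simp⟩
  | cons y l ih =>
    intro s
    rw [List.foldl_cons]
    simp only [PySem.Set.add]
    by_cases hc : PySem.Set.contains s y = true
    · rw [if_pos hc]
      obtain ⟨t, ht, he⟩ := ih s
      exact ⟨t, ht.cons _, he⟩
    · rw [if_neg hc]
      obtain ⟨t, ht, he⟩ := ih (s ++ [y])
      exact ⟨y :: t, ht.cons₂ _, by rw [he, List.append_assoc]; rfl⟩

theorem pvOfList_pairwise_lt (s : List String) (hp : s.Pairwise (· ≤ ·)) :
    (PySem.Set.ofList s).Pairwise (· < ·) := by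
  obtain ⟨t, ht, he⟩ := pvFoldlAdd_sublist s []
  have hof : PySem.Set.ofList s = t := by
    rw [PySem.Set.ofList_eq_foldl, he, List.nil_append]
  rw [hof]
  have h1 : t.Pairwise (· ≤ ·) := hp.sublist ht
  have h2 : t.Pairwise (· ≠ ·) := by
    have := PySem.Set.nodup_ofList s
    rw [hof] at this
    exact this
  exact (h1.and h2).imp (fun hab => lt_of_le_of_ne hab.1 hab.2)

-- after the leading run of x, every element is strictly above x
theorem pvRest_gt (x : String) : ∀ (xs : List String), (∀ y ∈ xs, x ≤ y) → xs.Pairwise (· ≤ ·) →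
    ∀ y ∈ xs.dropWhile (· == x), x < y := by
  intro xs
  induction xs with
  | nil => intro _ _ y hy; simp at hy
  | cons z t ih =>
    intro hle hp y hy
    rw [List.dropWhile_cons] at hy
    by_cases hz : (z == x) = true
    · simp only [hz, if_true] at hy
      exact ih (fun w hw => hle w (List.mem_cons_of_mem _ hw)) hp.tail y hy
    · simp only [hz, if_false, Bool.false_eq_true] at hy
      have hzx : x < z :=
        lt_of_le_of_ne (hle z (List.mem_cons_self ..)) (fun h => hz (by simp [h]))
      rcases List.mem_cons.mp hy with rfl | hyt
      · exact hzx
      · exact lt_of_lt_of_le hzx ((List.pairwise_cons.mp hp).1 y hyt)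

-- pvGroupCount on a sorted list lists each distinct value with its count
theorem pvGroupCount_sorted : ∀ (s : List String), s.Pairwise (· ≤ ·) →
    pvGroupCount s = (PySem.Set.ofList s).map (fun k => (k, (s.count k : Int))) := by
  intro s
  induction s using pvGroupCount.induct with
  | case1 => intro _; simp [pvGroupCount, PySem.Set.ofList_eq_foldl]
  | case2 x xs ih =>
    intro hp
    have hle : ∀ y ∈ xs, x ≤ y := (List.pairwise_cons.mp hp).1
    have hpxs : xs.Pairwise (· ≤ ·) := (List.pairwise_cons.mp hp).2
    set eqs := xs.takeWhile (· == x) with heqs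
    set rest := xs.dropWhile (· == x) with hrest
    have hsplit : eqs ++ rest = xs := List.takeWhile_append_dropWhile
    have heqx : ∀ y ∈ eqs, y = x := by
      intro y hy
      have := List.mem_takeWhile_imp hy
      exact eq_of_beq this
    have hgt : ∀ y ∈ rest, x < y := pvRest_gt x xs hle hpxs
    have hxrest : x ∉ rest := fun h => lt_irrefl x (hgt x h)
    have hprest : rest.Pairwise (· ≤ ·) := hpxs.sublist (List.dropWhile_sublist _)
    -- the distinct elements: ofList (x :: xs) = x :: ofList rest
    have hof : PySem.Set.ofList (x :: xs) = x :: PySem.Set.ofList rest := by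
      rw [PySem.Set.ofList_eq_foldl, List.foldl_cons, ← hsplit, List.foldl_append]
      have h1 : PySem.Set.add [] x = [x] := rfl
      have h2 : eqs.foldl PySem.Set.add [x] = [x] :=
        pvFoldlAdd_const eqs [x] (fun y hy => by simp [heqx y hy])
      rw [h1, h2, pvFoldlAdd_fresh rest [] x hxrest, PySem.Set.ofList_eq_foldl]
    -- counts
    have hcx : (x :: xs).count x = 1 + eqs.length := by
      have hceq : eqs.count x = eqs.length :=
        List.count_eq_length.mpr (fun y hy => (heqx y hy).symm)
      have hcrest : rest.count x = 0 := List.count_eq_zero.mpr hxrest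
      rw [List.count_cons_self, ← hsplit, List.count_append, hceq, hcrest]
      omega
    have hck : ∀ k ∈ rest, (x :: xs).count k = rest.count k := by
      intro k hk
      have hkx : k ≠ x := fun h => hxrest (h ▸ hk)
      have hceq : eqs.count k = 0 :=
        List.count_eq_zero.mpr (fun h => hkx (heqx k h))
      rw [List.count_cons_of_ne (Ne.symm hkx), ← hsplit, List.count_append, hceq]
      omega
    simp only [pvGroupCount]
    rw [← heqs, ← hrest, hof, List.map_cons, ih hprest]
    refine congrArg₂ _ (by rw [hcx]; push_cast; ring_nf) ?_
    apply List.map_congr_left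
    intro k hk
    rw [hck k ((PySem.Set.mem_ofList rest k).mp hk)]

-- sort-and-group equals the sorted Counter items, for any value list
theorem pvMain (l : List String) :
    PySem.List.sorted ((PySem.Set.ofList l).map (fun k => (k, (l.count k : Int)))) (fun p => p.1) false
    = pvGroupCount (PySem.List.sorted l (fun x => x) false) := by
  have hperm : (PySem.List.sorted l (fun x => x) false).Perm l := PySem.List.sorted_perm l _ _
  have hpair : (PySem.List.sorted l (fun x => x) false).Pairwise (· ≤ ·) := by
    simpa using PySem.List.sorted_pairwise l (fun x => x)
  rw [pvGroupCount_sorted _ hpair]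
  apply PySem.List.sorted_eq_of_perm_of_pairwise_lt
  · have hof : (PySem.Set.ofList (PySem.List.sorted l (fun x => x) false)).Perm (PySem.Set.ofList l) :=
      (List.perm_ext_iff_of_nodup (PySem.Set.nodup_ofList _) (PySem.Set.nodup_ofList _)).mpr
        (fun a => by simp [PySem.Set.mem_ofList, hperm.mem_iff])
    have hcnt : (PySem.Set.ofList (PySem.List.sorted l (fun x => x) false)).map
          (fun k => (k, ((PySem.List.sorted l (fun x => x) false).count k : Int)))
        = (PySem.Set.ofList (PySem.List.sorted l (fun x => x) false)).map
          (fun k => (k, (l.count k : Int))) :=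
      List.map_congr_left (fun k _ => by rw [hperm.count_eq])
    rw [hcnt]
    exact hof.map _
  · exact List.pairwise_map.mpr (pvOfList_pairwise_lt _ hpair)

-- ===== VERDICT (by name: the statement is the Claim_ definition above) =====
theorem count_metadata_value_rows_py_spec : Claim_equal_count_metadata_value_rows_py := by
  intro rows metadata_key _
  show count_metadata_value_rows_py rows metadata_key
      = count_metadata_value_rows_py_alt rows metadata_key
  unfold count_metadata_value_rows_py count_metadata_value_rows_py_alt
  rw [pvA_fold, pvB_fold, PySem.Dict.foldl_insert_getD_add_one_eq_counter]
  dsimp only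
  rw [PySem.Dict.items_counter, List.nil_append]
  exact pvMain (rows.filterMap (pvExtract metadata_key))
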